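-- pv_equiv track=rewrite | github.com/AlexCovizzi/critical-node-problem | graph.py | calc_objective
-- ===== SOURCE A (Python) =====
-- def visit_connected(graph, i, visited, removed=None):
--     if removed is None or i not in removed:
--         visited[i] = 1
--         row = graph[i]
--         for j in range(len(row)):
--             if row[j] == 1 and visited[j] == 0:
--                 visit_connected(graph, j, visited, removed)
--
-- def calc_objective(graph, removed):
--     sol = 0
--     visited = [0 for row in graph]
--
--     # segna i nodi rimossi come visitati, cosi non vengono contati
--     for i in removed:
--         visited[i] = 1
--
--     while sum(visited) != len(visited):
--         index = visited.index(0)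
--         visit_connected(graph, index, visited)
--         sol += 1
--
--     return sol
-- ===== SOURCE B (Python) =====
-- def calc_objective(graph, removed):
--     n = len(graph)
--     visited = [0] * n
--     for i in removed:
--         visited[i] = 1
--     count = 0
--     for s in range(n):
--         if visited[s] == 0:
--             count += 1
--             visited[s] = 1
--             stack = [s]
--             while stack:
--                 i = stack.pop()
--                 row = graph[i]
--                 for j in range(len(row)):
--                     if row[j] == 1 and visited[j] == 0:
--                         visited[j] = 1
--                         stack.append(j)
--     return count
-- ===== Notes on version B (the rewrite author's own statement) =====
-- stated objective: alternative
-- what changed: Replaces the recursive flood-fill with per-component sum(visited)/visited.index(0) rescans by a single pass over the vertices running an explicit-stack iterative DFS that counts components directly.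
import Mathlib
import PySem

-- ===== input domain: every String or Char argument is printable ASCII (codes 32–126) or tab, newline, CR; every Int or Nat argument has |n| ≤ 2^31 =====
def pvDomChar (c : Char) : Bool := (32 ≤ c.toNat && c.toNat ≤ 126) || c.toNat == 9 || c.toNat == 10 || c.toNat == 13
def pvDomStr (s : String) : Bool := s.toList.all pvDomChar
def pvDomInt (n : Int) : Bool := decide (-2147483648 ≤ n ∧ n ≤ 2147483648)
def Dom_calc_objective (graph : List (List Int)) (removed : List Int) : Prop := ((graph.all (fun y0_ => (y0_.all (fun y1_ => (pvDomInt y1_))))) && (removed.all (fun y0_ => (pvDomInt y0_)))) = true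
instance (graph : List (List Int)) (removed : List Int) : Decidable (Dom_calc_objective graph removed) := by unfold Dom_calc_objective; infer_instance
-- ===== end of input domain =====

-- B replaces A's recursive flood-fill (with its per-component sum/index rescans) by an
-- explicit-stack iterative DFS in one pass over the vertices; return values agree on Pre_.
-- A mutates nothing observable (its `visited` list is local), so equivalence is about the return value.

-- ===== PORT A =====
-- visit_connected(graph, i, visited, removed): recursive flood fill.
-- `fuel` only makes the recursion structural; calc_objective passes enough fuel
-- (recursion depth is bounded by the number of 0-entries of `visited` plus one).
-- `visited[i] = 1` / `visited[j]` with an out-of-range index raises in Python —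
-- such inputs are excluded by Pre_; the port uses set (no-op) / getD 1 there.
def visit_connected (fuel : Nat) (graph : List (List Int)) (i : Nat) (visited : List Int)
    (removed : Option (List Int)) : List Int :=
  match fuel with
  | 0 => visited
  | f + 1 =>
    if removed.elim false (fun l => l.contains (i : Int)) then visited
    else
      let v1 := visited.set i 1
      let row := graph.getD i []
      (List.range row.length).foldl
        (fun vv j =>
          if row.getD j 0 = 1 ∧ vv.getD j 1 = 0 then visit_connected f graph j vv removed else vv)
        v1

-- the `while sum(visited) != len(visited)` loop; at most len(visited) iterations run,
-- so the fuel passed by calc_objective is enough; `index` is always `some` there.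
def calc_loop (fuel : Nat) (graph : List (List Int)) (visited : List Int) (sol : Int) : Int :=
  match fuel with
  | 0 => sol
  | f + 1 =>
    if visited.sum ≠ (visited.length : Int) then
      match PySem.List.index? visited (0 : Int) with
      | some idx =>
          calc_loop f graph (visit_connected (visited.length + 1) graph idx visited none) (sol + 1)
      | none => sol
    else sol

def calc_objective (graph : List (List Int)) (removed : List Int) : Int :=
  let visited := graph.map (fun _ => (0 : Int))
  let visited := removed.foldl (fun vv i => PySem.List.pySetD vv i 1) visited
  calc_loop (graph.length + 1) graph visited 0

-- ===== PORT B =====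
-- `while stack:` loop of Source B; stack.pop() takes the LAST element.  `fuel` makes it
-- structural; calc_objective_alt passes enough (each iteration pops one element and
-- pushes at most as many elements as 0-entries it erases).
def cnp_stack_loop (fuel : Nat) (graph : List (List Int)) (stack : List Nat)
    (visited : List Int) : List Int :=
  match fuel with
  | 0 => visited
  | f + 1 =>
    match stack.getLast? with
    | none => visited
    | some i =>
      let rest := stack.dropLast
      let row := graph.getD i []
      let p := (List.range row.length).foldl
        (fun (p : List Int × List Nat) j =>
          if row.getD j 0 = 1 ∧ p.1.getD j 1 = 0 then (p.1.set j 1, p.2 ++ [j]) else p)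
        (visited, rest)
      cnp_stack_loop f graph p.2 p.1

def calc_objective_alt (graph : List (List Int)) (removed : List Int) : Int :=
  let n := graph.length
  let v0 := List.replicate n (0 : Int)
  let v1 := removed.foldl (fun vv i => PySem.List.pySetD vv i 1) v0
  ((List.range n).foldl
    (fun (p : Int × List Int) s =>
      if p.2.getD s 1 = 0 then (p.1 + 1, cnp_stack_loop (n + 1) graph [s] (p.2.set s 1)) else p)
    (0, v1)).1

-- ===== PRECONDITION & SPEC =====
-- Pre_ excludes exactly the inputs on which A raises an IndexError: a removed index out of
-- range of `visited`, or an entry 1 at a column ≥ len(graph) in the row of a node that is not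
-- marked removed (every such node is eventually visited and its whole row scanned).
def Pre_calc_objective (graph : List (List Int)) (removed : List Int) : Prop :=
  (∀ i ∈ removed, PySem.Raise.InRange graph.length i) ∧
  (∀ a, a < graph.length →
    (∀ i ∈ removed, i ≠ (a : Int) ∧ i ≠ (a : Int) - (graph.length : Int)) →
    ∀ b, b < (graph.getD a []).length → (graph.getD a []).getD b 0 = 1 → b < graph.length)
instance (graph : List (List Int)) (removed : List Int) : Decidable (Pre_calc_objective graph removed) := by
  unfold Pre_calc_objective; infer_instance

def pvWitness_calc_objective : List (List Int) × List Int := ([[0, 1], [1, 0]], [])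

def Spec_calc_objective (graph : List (List Int)) (removed : List Int) (out : Int) : Prop :=
  out = calc_objective_alt graph removed
instance (graph : List (List Int)) (removed : List Int) (out : Int) :
    Decidable (Spec_calc_objective graph removed out) := by unfold Spec_calc_objective; infer_instance

-- ===== CLAIM (what is proved, stated in full; the proofs are below) =====
def Claim_equal_calc_objective : Prop :=
  ∀ (graph : List (List Int)) (removed : List Int), Dom_calc_objective graph removed →
    Pre_calc_objective graph removed →
    Spec_calc_objective graph removed (calc_objective graph removed)

-- ===== LEMMAS AND PROOFS =====

-- entries of a visited list are 0 or 1
def E01 (v : List Int) : Prop := ∀ x ∈ v, x = 0 ∨ x = 1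

-- there is an edge a → b (reads as 0 outside the row, so edgeP implies b < row length)
def edgeP (g : List (List Int)) (a b : Nat) : Prop := (g.getD a []).getD b 0 = 1

-- nodes reachable from s through nodes unvisited in v
inductive Reach (g : List (List Int)) (v : List Int) (s : Nat) : Nat → Prop
  | base : Reach g v s s
  | step : ∀ {a b}, Reach g v s a → edgeP g a b → v.getD b 1 = 0 → Reach g v s b

-- every edge out of an unvisited node stays inside the matrix (what Pre_ guarantees)
def SafeV (g : List (List Int)) (v : List Int) : Prop :=
  ∀ a b, v.getD a 1 = 0 → edgeP g a b → b < v.length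

-- r extends v: same length, keeps every 1
def VExt (v r : List Int) : Prop := r.length = v.length ∧ ∀ a, v.getD a 1 = 1 → r.getD a 1 = 1

theorem VExt_refl (v : List Int) : VExt v v := ⟨rfl, fun _ h => h⟩

theorem VExt_trans {u v w : List Int} (h1 : VExt u v) (h2 : VExt v w) : VExt u w :=
  ⟨h2.1.trans h1.1, fun a ha => h2.2 a (h1.2 a ha)⟩

theorem getD_lt_length {v : List Int} {a : Nat} (h : v.getD a 1 = 0) : a < v.length := by
  by_contra hc
  rw [List.getD_eq_getElem?_getD, List.getElem?_eq_none (by omega)] at h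
  simp at h

theorem getD0_lt {l : List Int} {b : Nat} (h : l.getD b 0 = 1) : b < l.length := by
  by_contra hc
  rw [List.getD_eq_getElem?_getD, List.getElem?_eq_none (by omega)] at h
  simp at h

theorem getD_set_self {v : List Int} {i : Nat} {x : Int} (h : i < v.length) :
    (v.set i x).getD i 1 = x := by
  rw [List.getD_eq_getElem _ _ (show i < (v.set i x).length by simpa using h)]
  simp

theorem getD_set_ne {v : List Int} {i a : Nat} {x : Int} (h : a ≠ i) :
    (v.set i x).getD a 1 = v.getD a 1 := by
  rw [List.getD_eq_getElem?_getD, List.getD_eq_getElem?_getD, List.getElem?_set_ne (by omega)]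

theorem e01_getD {v : List Int} (h : E01 v) (a : Nat) : v.getD a 1 = 0 ∨ v.getD a 1 = 1 := by
  by_cases ha : a < v.length
  · rw [List.getD_eq_getElem _ _ ha]
    exact h _ (List.getElem_mem ha)
  · right
    rw [List.getD_eq_getElem?_getD, List.getElem?_eq_none (by omega)]
    rfl

theorem e01_set {v : List Int} (h : E01 v) (i : Nat) : E01 (v.set i 1) := by
  intro x hx
  rcases List.mem_or_eq_of_mem_set hx with hx | hx
  · exact h x hx
  · right; exact hx

theorem VExt_zsub {v r : List Int} (hv : E01 v) (h : VExt v r) :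
    ∀ a, r.getD a 1 = 0 → v.getD a 1 = 0 := by
  intro a ha
  rcases e01_getD hv a with h0 | h1
  · exact h0
  · exact absurd (h.2 a h1) (by rw [ha]; norm_num)

theorem VExt_set {v : List Int} (i : Nat) : VExt v (v.set i 1) := by
  refine ⟨by simp, fun a ha => ?_⟩
  by_cases hai : a = i
  · subst hai
    by_cases hi : a < v.length
    · exact getD_set_self hi
    · rw [List.set_eq_of_length_le (by omega)]; exact ha
  · rw [getD_set_ne hai]; exact ha

-- count of zeros: monotone under VExt, decreases by one on setting a zero
theorem count0_le : ∀ (v r : List Int), v.length = r.length → E01 v →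
    (∀ a, v.getD a 1 = 1 → r.getD a 1 = 1) → r.count 0 ≤ v.count 0 := by
  intro v
  induction v with
  | nil => intro r hl _ _; rw [List.length_nil] at hl; rw [List.eq_nil_of_length_eq_zero hl.symm]
  | cons x xs ih =>
    intro r hl h01 hmono
    match r with
    | [] => simp at hl
    | y :: ys =>
      have hx : x = 0 ∨ x = 1 := h01 x (by simp)
      have htl : ys.count 0 ≤ xs.count 0 := by
        refine ih ys (by simpa using hl) (fun z hz => h01 z (by simp [hz])) ?_
        intro a ha
        have := hmono (a + 1) (by simpa using ha)
        simpa using this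
      have hhd : x = 1 → y = 1 := fun hx1 => by
        have := hmono 0 (by simpa using hx1)
        simpa using this
      rcases hx with hx0 | hx1
      · subst hx0
        simp [List.count_cons]
        split <;> omega
      · subst hx1
        have hy : y = 1 := hhd rfl
        subst hy
        simp only [List.count_cons]
        omega

theorem count0_set : ∀ (v : List Int) (i : Nat), v.getD i 1 = 0 →
    v.count 0 = (v.set i 1).count 0 + 1 := by
  intro v
  induction v with
  | nil => intro i h; simp at h
  | cons x xs ih =>
    intro i h
    match i with
    | 0 =>
      have hx : x = 0 := by simpa using h
      subst hx
      simp
    | i + 1 =>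
      have h' : xs.getD i 1 = 0 := by simpa using h
      have := ih i h'
      have hset : (x :: xs).set (i + 1) 1 = x :: xs.set i 1 := by simp
      rw [hset]
      simp only [List.count_cons]
      omega

theorem sum_add_count0 : ∀ (v : List Int), E01 v → v.sum + (v.count 0 : Int) = v.length := by
  intro v
  induction v with
  | nil => intro _; simp
  | cons x xs ih =>
    intro h01
    have hx : x = 0 ∨ x = 1 := h01 x (by simp)
    have htl := ih (fun z hz => h01 z (by simp [hz]))
    rcases hx with hx | hx <;> subst hx <;>
      simp [List.sum_cons] <;> omega

theorem index?_first_zero : ∀ (v : List Int) (k : Nat),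
    (∀ t, t < k → v.getD t 1 = 1) → v.getD k 1 = 0 →
    PySem.List.index? v (0 : Int) = some k := by
  intro v
  induction v with
  | nil => intro k _ h; simp at h
  | cons x xs ih =>
    intro k hpre hk
    match k with
    | 0 =>
      have hx : x = 0 := by simpa using hk
      subst hx
      rw [PySem.List.index?_eq_idxOf?, List.idxOf?_cons]
      simp
    | k + 1 =>
      have hx : x = 1 := by simpa using hpre 0 (by omega)
      have hne : x ≠ (0 : Int) := by omega
      have hxs : PySem.List.index? xs (0 : Int) = some k := by
        refine ih k (fun t ht => ?_) (by simpa using hk)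
        have := hpre (t + 1) (by omega)
        simpa using this
      rw [PySem.List.index?_eq_idxOf?] at hxs ⊢
      rw [List.idxOf?_cons]
      simp [hne, hxs]

theorem reach_unvis {g : List (List Int)} {v : List Int} {s a : Nat}
    (h : Reach g v s a) : a = s ∨ v.getD a 1 = 0 := by
  cases h with
  | base => exact Or.inl rfl
  | step _ _ hv => exact Or.inr hv

theorem reach_marked {g : List (List Int)} {v r : List Int} {s : Nat}
    (hs0 : v.getD s 1 = 0) (hsafe : SafeV g v)
    (hrs : r.getD s 1 = 1)
    (hcl : ∀ a b, v.getD a 1 = 0 → r.getD a 1 = 1 → edgeP g a b → b < v.length → r.getD b 1 = 1) :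
    ∀ {a}, Reach g v s a → r.getD a 1 = 1 := by
  intro a h
  induction h with
  | base => exact hrs
  | @step a b hR hE hv ih =>
    have hva : v.getD a 1 = 0 := by
      rcases reach_unvis hR with h' | h'
      · exact h' ▸ hs0
      · exact h'
    have hb : b < v.length := hsafe a b hva hE
    exact hcl a b hva ih hE hb

-- the inner `for j in range(len(row))` fold of visit_connected, named for the proofs
def aFold (f : Nat) (g : List (List Int)) (row : List Int) (l : List Nat) (vv : List Int) : List Int :=
  l.foldl
    (fun vv j => if row.getD j 0 = 1 ∧ vv.getD j 1 = 0 then visit_connected f g j vv none else vv)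
    vv

theorem aFold_cons (f : Nat) (g : List (List Int)) (row : List Int) (j : Nat) (l : List Nat)
    (vv : List Int) :
    aFold f g row (j :: l) vv =
      aFold f g row l
        (if row.getD j 0 = 1 ∧ vv.getD j 1 = 0 then visit_connected f g j vv none else vv) := rfl

theorem visit_connected_succ (f : Nat) (g : List (List Int)) (i : Nat) (v : List Int) :
    visit_connected (f + 1) g i v none =
      aFold f g (g.getD i []) (List.range (g.getD i []).length) (v.set i 1) := by
  simp [visit_connected, aFold]

-- ===== A-side mega-lemma =====
theorem vc_spec (g : List (List Int)) (v0 : List Int) (s : Nat) :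
    ∀ (fuel : Nat) (i : Nat) (v : List Int),
      E01 v →
      (∀ a, v.getD a 1 = 0 → v0.getD a 1 = 0) →
      (∀ a, v.getD a 1 = 1 → v0.getD a 1 = 1 ∨ Reach g v0 s a) →
      Reach g v0 s i →
      v.getD i 1 = 0 →
      v.count 0 + 1 ≤ fuel →
      VExt v (visit_connected fuel g i v none) ∧
      E01 (visit_connected fuel g i v none) ∧
      (∀ a, (visit_connected fuel g i v none).getD a 1 = 1 → v0.getD a 1 = 1 ∨ Reach g v0 s a) ∧
      (visit_connected fuel g i v none).getD i 1 = 1 ∧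
      (∀ a b, v.getD a 1 = 0 → (visit_connected fuel g i v none).getD a 1 = 1 →
        edgeP g a b → b < v.length → (visit_connected fuel g i v none).getD b 1 = 1) := by
  intro fuel
  induction fuel with
  | zero => intro i v _ _ _ _ _ hf; omega
  | succ f ih =>
    intro i v h01 hzsub hsnd hRi hvi hfuel
    have hilen : i < v.length := getD_lt_length hvi
    have hstep := visit_connected_succ f g i v
    set row := g.getD i [] with hrow
    set v1 := v.set i 1 with hv1
    have hE1 : VExt v v1 := VExt_set i
    have h011 : E01 v1 := e01_set h01 i
    have hv1i : v1.getD i 1 = 1 := getD_set_self hilen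
    have hz1 : ∀ a, v1.getD a 1 = 0 → v0.getD a 1 = 0 := fun a ha =>
      hzsub a (VExt_zsub h01 hE1 a ha)
    have hs1 : ∀ a, v1.getD a 1 = 1 → v0.getD a 1 = 1 ∨ Reach g v0 s a := by
      intro a ha
      by_cases hai : a = i
      · exact hai ▸ Or.inr hRi
      · exact hsnd a (by rwa [hv1, getD_set_ne hai] at ha)
    have hcnt1 : v.count 0 = v1.count 0 + 1 := count0_set v i hvi
    have hlen1 : v1.length = v.length := by simp [hv1]
    -- inner fold lemma
    have inner : ∀ (l : List Nat) (vv : List Int), E01 vv →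
        (∀ a, vv.getD a 1 = 0 → v0.getD a 1 = 0) →
        (∀ a, vv.getD a 1 = 1 → v0.getD a 1 = 1 ∨ Reach g v0 s a) →
        VExt v1 vv → vv.count 0 ≤ v1.count 0 →
        (∀ a b, v1.getD a 1 = 0 → vv.getD a 1 = 1 → edgeP g a b → b < v.length →
          vv.getD b 1 = 1) →
        (VExt vv (aFold f g row l vv) ∧
          E01 (aFold f g row l vv) ∧
          (∀ a, (aFold f g row l vv).getD a 1 = 0 → v0.getD a 1 = 0) ∧
          (∀ a, (aFold f g row l vv).getD a 1 = 1 → v0.getD a 1 = 1 ∨ Reach g v0 s a) ∧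
          (aFold f g row l vv).count 0 ≤ v1.count 0 ∧
          (∀ a b, v1.getD a 1 = 0 → (aFold f g row l vv).getD a 1 = 1 → edgeP g a b →
            b < v.length → (aFold f g row l vv).getD b 1 = 1) ∧
          (∀ j ∈ l, row.getD j 0 = 1 → (aFold f g row l vv).getD j 1 = 1)) := by
      intro l
      induction l with
      | nil =>
        intro vv h01v hzv hsv hEv hcv hNCv
        refine ⟨VExt_refl vv, h01v, hzv, hsv, hcv, hNCv, ?_⟩
        intro j hj; simp at hj
      | cons j l ihl =>
        intro vv h01v hzv hsv hEv hcv hNCv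
        rw [aFold_cons]
        by_cases hc : row.getD j 0 = 1 ∧ vv.getD j 1 = 0
        · rw [if_pos hc]
          have hvvlen : vv.length = v.length := hEv.1.trans hlen1
          have hRj : Reach g v0 s j := Reach.step hRi (by exact hc.1) (hzv j hc.2)
          have hfj : vv.count 0 + 1 ≤ f := by omega
          obtain ⟨hExt', h01', hsnd', hj', hNCcall⟩ :=
            ih j vv h01v hzv hsv hRj hc.2 hfj
          have hz' : ∀ a, (visit_connected f g j vv none).getD a 1 = 0 → v0.getD a 1 = 0 :=
            fun a ha => hzv a (VExt_zsub h01v hExt' a ha)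
          have hE' : VExt v1 (visit_connected f g j vv none) := VExt_trans hEv hExt'
          have hc' : (visit_connected f g j vv none).count 0 ≤ v1.count 0 :=
            le_trans (count0_le vv _ hExt'.1.symm h01v hExt'.2) hcv
          have hNC' : ∀ a b, v1.getD a 1 = 0 → (visit_connected f g j vv none).getD a 1 = 1 →
              edgeP g a b → b < v.length → (visit_connected f g j vv none).getD b 1 = 1 := by
            intro a b ha1 hva hEab hblt
            rcases e01_getD h01v a with hva0 | hva1
            · exact hNCcall a b hva0 hva hEab (by omega)
            · exact hExt'.2 b (hNCv a b ha1 hva1 hEab hblt)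
          obtain ⟨hW1, hW2, hW3, hW4, hW5, hW6, hW7⟩ :=
            ihl (visit_connected f g j vv none) h01' hz' hsnd' hE' hc' hNC'
          refine ⟨VExt_trans hExt' hW1, hW2, hW3, hW4, hW5, hW6, ?_⟩
          intro t ht hrt
          rcases List.mem_cons.mp ht with ht | ht
          · subst ht; exact hW1.2 t hj'
          · exact hW7 t ht hrt
        · rw [if_neg hc]
          obtain ⟨hW1, hW2, hW3, hW4, hW5, hW6, hW7⟩ :=
            ihl vv h01v hzv hsv hEv hcv hNCv
          refine ⟨hW1, hW2, hW3, hW4, hW5, hW6, ?_⟩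
          intro t ht hrt
          rcases List.mem_cons.mp ht with ht | ht
          · subst ht
            have hvt : vv.getD t 1 = 1 := by
              rcases e01_getD h01v t with h0 | h1
              · exact absurd ⟨hrt, h0⟩ hc
              · exact h1
            exact hW1.2 t hvt
          · exact hW7 t ht hrt
    have hNC1 : ∀ a b, v1.getD a 1 = 0 → v1.getD a 1 = 1 → edgeP g a b → b < v.length →
        v1.getD b 1 = 1 := by
      intro a b h0 h1; rw [h0] at h1; exact absurd h1 (by norm_num)
    obtain ⟨hW1, hW2, hW3, hW4, hW5, hW6, hW7⟩ :=
      inner (List.range row.length) v1 h011 hz1 hs1 (VExt_refl v1) le_rfl hNC1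
    rw [hstep]
    refine ⟨VExt_trans hE1 hW1, hW2, hW4, hW1.2 i hv1i, ?_⟩
    intro a b ha hra hEab hblt
    by_cases hai : a = i
    · subst hai
      have hrb : row.getD b 0 = 1 := hEab
      have hbrow : b < row.length := getD0_lt hrb
      exact hW7 b (List.mem_range.mpr hbrow) hrb
    · have ha1 : v1.getD a 1 = 0 := by rw [hv1, getD_set_ne hai]; exact ha
      exact hW6 a b ha1 hra hEab hblt

-- the inner `for j in range(len(row))` fold of the stack loop, named for the proofs
def bFold (row : List Int) (l : List Nat) (q : List Int × List Nat) : List Int × List Nat :=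
  l.foldl
    (fun p j => if row.getD j 0 = 1 ∧ p.1.getD j 1 = 0 then (p.1.set j 1, p.2 ++ [j]) else p)
    q

theorem bFold_cons (row : List Int) (j : Nat) (l : List Nat) (q : List Int × List Nat) :
    bFold row (j :: l) q =
      bFold row l
        (if row.getD j 0 = 1 ∧ q.1.getD j 1 = 0 then (q.1.set j 1, q.2 ++ [j]) else q) := rfl

-- ===== B-side mega-lemma =====
theorem sl_spec (g : List (List Int)) (v0 : List Int) (s : Nat) :
    ∀ (fuel : Nat) (stack : List Nat) (v : List Int),
      E01 v →
      (∀ a, v.getD a 1 = 0 → v0.getD a 1 = 0) →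
      (∀ a, v.getD a 1 = 1 → v0.getD a 1 = 1 ∨ Reach g v0 s a) →
      (∀ x ∈ stack, v.getD x 1 = 1) →
      (∀ x ∈ stack, Reach g v0 s x) →
      v.count 0 + stack.length ≤ fuel →
      VExt v (cnp_stack_loop fuel g stack v) ∧
      E01 (cnp_stack_loop fuel g stack v) ∧
      (∀ a, (cnp_stack_loop fuel g stack v).getD a 1 = 1 → v0.getD a 1 = 1 ∨ Reach g v0 s a) ∧
      (∀ a b, (a ∈ stack ∨ (v.getD a 1 = 0 ∧ (cnp_stack_loop fuel g stack v).getD a 1 = 1)) →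
        edgeP g a b → b < v.length → (cnp_stack_loop fuel g stack v).getD b 1 = 1) := by
  intro fuel
  induction fuel with
  | zero =>
    intro stack v h01 hz hsnd hmk hrk hf
    have hstack : stack = [] := List.length_eq_zero_iff.mp (by omega)
    subst hstack
    refine ⟨VExt_refl v, h01, hsnd, ?_⟩
    intro a b hmem _ _
    rcases hmem with hmem | ⟨h0, h1⟩
    · simp at hmem
    · rw [show cnp_stack_loop 0 g [] v = v from rfl] at h1
      rw [h0] at h1; exact absurd h1 (by norm_num)
  | succ f ih =>
    intro stack v h01 hz hsnd hmk hrk hf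
    cases hS : stack.getLast? with
    | none =>
      have hstack : stack = [] := List.getLast?_eq_none_iff.mp hS
      subst hstack
      have hid : cnp_stack_loop (f + 1) g [] v = v := rfl
      rw [hid]
      refine ⟨VExt_refl v, h01, hsnd, ?_⟩
      intro a b hmem _ _
      rcases hmem with hmem | ⟨h0, h1⟩
      · simp at hmem
      · rw [h0] at h1; exact absurd h1 (by norm_num)
    | some i =>
      have hne : stack ≠ [] := by intro h; subst h; simp at hS
      have hlast : stack.getLast hne = i := by
        rw [List.getLast?_eq_some_getLast hne] at hS; exact Option.some.inj hS
      have hdrop : stack.dropLast ++ [i] = stack := by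
        rw [← hlast]; exact List.dropLast_concat_getLast hne
      have hRi : Reach g v0 s i := hrk i (by rw [← hdrop]; simp)
      set row := g.getD i [] with hrow
      set rest := stack.dropLast with hrest
      have hstep : cnp_stack_loop (f + 1) g stack v =
          cnp_stack_loop f g (bFold row (List.range row.length) (v, rest)).2
            (bFold row (List.range row.length) (v, rest)).1 := by
        rw [cnp_stack_loop.eq_def]
        simp only [hS, bFold, hrow, hrest]
      have inner : ∀ (l : List Nat) (w : List Int) (st : List Nat), E01 w →
          (∀ a, w.getD a 1 = 0 → v0.getD a 1 = 0) →
          (∀ a, w.getD a 1 = 1 → v0.getD a 1 = 1 ∨ Reach g v0 s a) →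
          (∀ x ∈ st, w.getD x 1 = 1) →
          (∀ x ∈ st, Reach g v0 s x) →
          (VExt w (bFold row l (w, st)).1 ∧
            E01 (bFold row l (w, st)).1 ∧
            (∀ a, (bFold row l (w, st)).1.getD a 1 = 0 → v0.getD a 1 = 0) ∧
            (∀ a, (bFold row l (w, st)).1.getD a 1 = 1 → v0.getD a 1 = 1 ∨ Reach g v0 s a) ∧
            (∀ x ∈ st, x ∈ (bFold row l (w, st)).2) ∧
            (∀ x ∈ (bFold row l (w, st)).2, (bFold row l (w, st)).1.getD x 1 = 1) ∧
            (∀ x ∈ (bFold row l (w, st)).2, Reach g v0 s x) ∧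
            ((bFold row l (w, st)).1.count 0 + (bFold row l (w, st)).2.length =
              w.count 0 + st.length) ∧
            (∀ j ∈ l, row.getD j 0 = 1 → (bFold row l (w, st)).1.getD j 1 = 1) ∧
            (∀ a, w.getD a 1 = 0 → (bFold row l (w, st)).1.getD a 1 = 1 →
              a ∈ (bFold row l (w, st)).2)) := by
        intro l
        induction l with
        | nil =>
          intro w st h01w hzw hsw hmkw hrkw
          simp only [bFold, List.foldl_nil]
          refine ⟨VExt_refl w, h01w, hzw, hsw, fun x hx => hx, hmkw, hrkw, by trivial, ?_, ?_⟩
          · intro j hj; simp at hj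
          · intro a h0 h1; rw [h0] at h1; exact absurd h1 (by norm_num)
        | cons j l ihl =>
          intro w st h01w hzw hsw hmkw hrkw
          rw [bFold_cons]
          by_cases hc : row.getD j 0 = 1 ∧ w.getD j 1 = 0
          · rw [if_pos hc]
            have hjlen : j < w.length := getD_lt_length hc.2
            have hRj : Reach g v0 s j := Reach.step hRi (by exact hc.1) (hzw j hc.2)
            have h01' : E01 (w.set j 1) := e01_set h01w j
            have hz' : ∀ a, (w.set j 1).getD a 1 = 0 → v0.getD a 1 = 0 := by
              intro a ha
              by_cases haj : a = j
              · subst haj; rw [getD_set_self hjlen] at ha; exact absurd ha (by norm_num)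
              · rw [getD_set_ne haj] at ha; exact hzw a ha
            have hs' : ∀ a, (w.set j 1).getD a 1 = 1 → v0.getD a 1 = 1 ∨ Reach g v0 s a := by
              intro a ha
              by_cases haj : a = j
              · subst haj; exact Or.inr hRj
              · rw [getD_set_ne haj] at ha; exact hsw a ha
            have hmk' : ∀ x ∈ st ++ [j], (w.set j 1).getD x 1 = 1 := by
              intro x hx
              rcases List.mem_append.mp hx with hx | hx
              · exact (VExt_set j).2 x (hmkw x hx)
              · rw [List.mem_singleton.mp hx]; exact getD_set_self hjlen
            have hrk' : ∀ x ∈ st ++ [j], Reach g v0 s x := by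
              intro x hx
              rcases List.mem_append.mp hx with hx | hx
              · exact hrkw x hx
              · rw [List.mem_singleton.mp hx]; exact hRj
            obtain ⟨W1, W2, W3, W4, W5, W6, W7, W8, W9, W10⟩ :=
              ihl (w.set j 1) (st ++ [j]) h01' hz' hs' hmk' hrk'
            have hcnt : w.count 0 = (w.set j 1).count 0 + 1 := count0_set w j hc.2
            refine ⟨VExt_trans (VExt_set j) W1, W2, W3, W4, ?_, W6, W7, ?_, ?_, ?_⟩
            · intro x hx; exact W5 x (List.mem_append.mpr (Or.inl hx))
            · rw [W8]; simp; omega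
            · intro t ht hrt
              rcases List.mem_cons.mp ht with ht | ht
              · subst ht; exact W1.2 t (getD_set_self hjlen)
              · exact W9 t ht hrt
            · intro a h0 h1
              by_cases haj : a = j
              · subst haj; exact W5 a (List.mem_append.mpr (Or.inr (by simp)))
              · exact W10 a (by rw [getD_set_ne haj]; exact h0) h1
          · rw [if_neg hc]
            obtain ⟨W1, W2, W3, W4, W5, W6, W7, W8, W9, W10⟩ :=
              ihl w st h01w hzw hsw hmkw hrkw
            refine ⟨W1, W2, W3, W4, W5, W6, W7, W8, ?_, W10⟩
            intro t ht hrt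
            rcases List.mem_cons.mp ht with ht | ht
            · subst ht
              have hwt : w.getD t 1 = 1 := by
                rcases e01_getD h01w t with h0' | h1'
                · exact absurd ⟨hrt, h0'⟩ hc
                · exact h1'
              exact W1.2 t hwt
            · exact W9 t ht hrt
      obtain ⟨I1, I2, I3, I4, I5, I6, I7, I8, I9, I10⟩ :=
        inner (List.range row.length) v rest h01 hz hsnd
          (fun x hx => hmk x (by rw [← hdrop]; exact List.mem_append.mpr (Or.inl hx)))
          (fun x hx => hrk x (by rw [← hdrop]; exact List.mem_append.mpr (Or.inl hx)))
      have hlenstack : stack.length = rest.length + 1 := by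
        rw [← hdrop]; simp
      have hf' : (bFold row (List.range row.length) (v, rest)).1.count 0 +
          (bFold row (List.range row.length) (v, rest)).2.length ≤ f := by
        rw [I8]; omega
      obtain ⟨X1, X2, X3, X4⟩ :=
        ih (bFold row (List.range row.length) (v, rest)).2
          (bFold row (List.range row.length) (v, rest)).1 I2 I3 I4 I6 I7 hf'
      rw [hstep]
      refine ⟨VExt_trans I1 X1, X2, X3, ?_⟩
      intro a b hmem hEab hblt
      have hlenW : (bFold row (List.range row.length) (v, rest)).1.length = v.length := I1.1
      rcases hmem with hmem | ⟨hva, hra⟩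
      · rw [← hdrop] at hmem
        rcases List.mem_append.mp hmem with hmem | hmem
        · exact X4 a b (Or.inl (I5 a hmem)) hEab (by omega)
        · have hai := List.mem_singleton.mp hmem
          subst hai
          have hrb : row.getD b 0 = 1 := hEab
          have hbrow : b < row.length := getD0_lt hrb
          exact X1.2 b (I9 b (List.mem_range.mpr hbrow) hrb)
      · rcases e01_getD I2 a with h0' | h1'
        · exact X4 a b (Or.inr ⟨h0', hra⟩) hEab (by omega)
        · exact X4 a b (Or.inl (I10 a hva h1')) hEab (by omega)

-- the two flood fills agree
theorem call_eq (g : List (List Int)) (v : List Int) (s : Nat)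
    (h01 : E01 v) (hs : v.getD s 1 = 0) (hsafe : SafeV g v) (hvlen : v.length = g.length) :
    visit_connected (v.length + 1) g s v none =
      cnp_stack_loop (g.length + 1) g [s] (v.set s 1) := by
  have hslen : s < v.length := getD_lt_length hs
  obtain ⟨A1, A2, A3, A4, A5⟩ :=
    vc_spec g v s (v.length + 1) s v h01 (fun a ha => ha) (fun a ha => Or.inl ha)
      Reach.base hs (by have := List.count_le_length (a := (0 : Int)) (l := v); omega)
  have hcnt : v.count 0 = (v.set s 1).count 0 + 1 := count0_set v s hs
  obtain ⟨B1, B2, B3, B4⟩ :=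
    sl_spec g v s (g.length + 1) [s] (v.set s 1) (e01_set h01 s)
      (by
        intro a ha
        by_cases has : a = s
        · subst has; rw [getD_set_self hslen] at ha; exact absurd ha (by norm_num)
        · rwa [getD_set_ne has] at ha)
      (by
        intro a ha
        by_cases has : a = s
        · subst has; exact Or.inr Reach.base
        · rw [getD_set_ne has] at ha; exact Or.inl ha)
      (by intro x hx; rw [List.mem_singleton.mp hx]; exact getD_set_self hslen)
      (by intro x hx; rw [List.mem_singleton.mp hx]; exact Reach.base)
      (by
        have := List.count_le_length (a := (0 : Int)) (l := v)
        simp only [List.length_singleton]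
        omega)
  set rA := visit_connected (v.length + 1) g s v none with hrA
  set rB := cnp_stack_loop (g.length + 1) g [s] (v.set s 1) with hrB
  have hAiff : ∀ a, rA.getD a 1 = 1 ↔ (v.getD a 1 = 1 ∨ Reach g v s a) := by
    intro a
    constructor
    · exact A3 a
    · rintro (h | h)
      · exact A1.2 a h
      · exact reach_marked hs hsafe A4 A5 h
  have hBcl : ∀ a b, v.getD a 1 = 0 → rB.getD a 1 = 1 → edgeP g a b → b < v.length →
      rB.getD b 1 = 1 := by
    intro a b ha hra hEab hblt
    by_cases has : a = s
    · subst has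
      exact B4 a b (Or.inl (by simp)) hEab (by simpa using hblt)
    · exact B4 a b (Or.inr ⟨by rw [getD_set_ne has]; exact ha, hra⟩) hEab (by simpa using hblt)
  have hBs : rB.getD s 1 = 1 := B1.2 s (getD_set_self hslen)
  have hBiff : ∀ a, rB.getD a 1 = 1 ↔ (v.getD a 1 = 1 ∨ Reach g v s a) := by
    intro a
    constructor
    · intro h; exact B3 a h
    · rintro (h | h)
      · exact B1.2 a ((VExt_set s).2 a h)
      · exact reach_marked hs hsafe hBs hBcl h
  have hlenA : rA.length = v.length := A1.1
  have hlenB : rB.length = v.length := by rw [B1.1]; simp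
  have hpt : ∀ a, rA.getD a 1 = rB.getD a 1 := by
    intro a
    rcases e01_getD A2 a with h0 | h1
    · rcases e01_getD B2 a with g0 | g1
      · rw [h0, g0]
      · exact absurd ((hAiff a).mpr ((hBiff a).mp g1)) (by rw [h0]; norm_num)
    · rw [h1, (hBiff a).mpr ((hAiff a).mp h1)]
  apply List.ext_getElem (by omega)
  intro k hk1 hk2
  have := hpt k
  rwa [List.getD_eq_getElem rA 1 hk1, List.getD_eq_getElem rB 1 hk2] at this

-- outer loops agree
theorem outer_eq (g : List (List Int)) :
    ∀ (m k : Nat) (v : List Int) (sol : Int) (fuel : Nat),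
      k + m = g.length →
      v.length = g.length →
      E01 v → SafeV g v →
      (∀ t, t < k → v.getD t 1 = 1) →
      v.count 0 + 1 ≤ fuel →
      calc_loop fuel g v sol =
        ((List.range' k m).foldl
          (fun (p : Int × List Int) s =>
            if p.2.getD s 1 = 0 then
              (p.1 + 1, cnp_stack_loop (g.length + 1) g [s] (p.2.set s 1))
            else p)
          (sol, v)).1 := by
  intro m
  induction m with
  | zero =>
    intro k v sol fuel hkm hvlen h01 hsafe hpre hfc
    have hnz : (0 : Int) ∉ v := by
      intro hmem
      obtain ⟨idx, hidx, hval⟩ := List.getElem_of_mem hmem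
      have : v.getD idx 1 = 1 := hpre idx (by omega)
      rw [List.getD_eq_getElem v 1 hidx, hval] at this
      norm_num at this
    have hcnt : v.count 0 = 0 := List.count_eq_zero.mpr hnz
    have hsum := sum_add_count0 v h01
    rw [List.range'_zero, List.foldl_nil]
    cases fuel with
    | zero => rfl
    | succ f =>
      rw [calc_loop]
      rw [if_neg (by omega)]
  | succ m ihm =>
    intro k v sol fuel hkm hvlen h01 hsafe hpre hfc
    cases fuel with
    | zero => omega
    | succ f =>
      rw [show List.range' k (m + 1) = k :: List.range' (k + 1) m from List.range'_succ,
        List.foldl_cons]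
      rcases e01_getD h01 k with hk | hk
      · -- k is unvisited: both sides start a new component at k
        have hklen : k < v.length := getD_lt_length hk
        have hmem : (0 : Int) ∈ v := by
          have : v[k] = 0 := by rw [← List.getD_eq_getElem v 1 hklen]; exact hk
          exact this ▸ List.getElem_mem hklen
        have hcpos : 0 < v.count 0 := List.count_pos_iff.mpr hmem
        have hsum := sum_add_count0 v h01
        have hidx : PySem.List.index? v (0 : Int) = some k :=
          index?_first_zero v k (fun t ht => hpre t ht) hk
        rw [calc_loop, if_pos (by omega), hidx]
        simp only [if_pos hk]
        obtain ⟨A1, A2, A3, A4, A5⟩ :=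
          vc_spec g v k (v.length + 1) k v h01 (fun a ha => ha) (fun a ha => Or.inl ha)
            Reach.base hk (by have := List.count_le_length (a := (0 : Int)) (l := v); omega)
        set rA := visit_connected (v.length + 1) g k v none with hrAdef
        have hcall : rA = cnp_stack_loop (g.length + 1) g [k] (v.set k 1) :=
          call_eq g v k h01 hk hsafe hvlen
        have hcnt1 : v.count 0 = (v.set k 1).count 0 + 1 := count0_set v k hk
        have hrAcnt : rA.count 0 ≤ (v.set k 1).count 0 := by
          refine count0_le (v.set k 1) rA (by rw [A1.1]; simp) (e01_set h01 k) ?_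
          intro a ha
          by_cases hak : a = k
          · subst hak; exact A4
          · rw [getD_set_ne hak] at ha; exact A1.2 a ha
        have := ihm (k + 1) rA (sol + 1) f (by omega) (by rw [A1.1]; exact hvlen) A2
          (by
            intro a b h0 hE
            have hva : v.getD a 1 = 0 := VExt_zsub h01 A1 a h0
            have := hsafe a b hva hE
            rw [A1.1]; exact this)
          (by
            intro t ht
            by_cases htk : t = k
            · subst htk; exact A4
            · exact A1.2 t (hpre t (by omega)))
          (by omega)
        rw [this, hcall]
      · -- k already visited: both sides skip k
        rw [calc_loop]
        simp only [if_neg (by rw [hk]; norm_num : ¬v.getD k 1 = 0)]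
        have := ihm (k + 1) v sol (f + 1) (by omega) hvlen h01 hsafe
          (by
            intro t ht
            by_cases htk : t = k
            · subst htk; exact hk
            · exact hpre t (by omega))
          hfc
        rw [← this, calc_loop]

-- ===== initial marking facts =====
theorem mark_foldl_length (rs : List Int) (v : List Int) :
    (rs.foldl (fun vv i => PySem.List.pySetD vv i 1) v).length = v.length := by
  induction rs generalizing v with
  | nil => rfl
  | cons r rs ih => rw [List.foldl_cons, ih, PySem.List.length_pySetD]

theorem pySetD_cases (v : List Int) (i : Int) :
    PySem.List.pySetD v i 1 = v ∨ ∃ t, t < v.length ∧ PySem.List.pySetD v i 1 = v.set t 1 := by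
  unfold PySem.List.pySetD PySem.List.pySet? PySem.List.pyIdx?
  split_ifs with h1 h2 h3
  · right
    exact ⟨i.toNat, by omega, rfl⟩
  · left; rfl
  · right
    refine ⟨v.length - (-i).toNat, by omega, rfl⟩
  · left; rfl

theorem mark_foldl_ext (rs : List Int) (v : List Int) :
    VExt v (rs.foldl (fun vv i => PySem.List.pySetD vv i 1) v) := by
  induction rs generalizing v with
  | nil => exact VExt_refl v
  | cons r rs ih =>
    rw [List.foldl_cons]
    refine VExt_trans ?_ (ih _)
    rcases pySetD_cases v r with h | ⟨t, _, h⟩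
    · rw [h]; exact VExt_refl v
    · rw [h]; exact VExt_set t

theorem mark_foldl_e01 (rs : List Int) (v : List Int) (h : E01 v) :
    E01 (rs.foldl (fun vv i => PySem.List.pySetD vv i 1) v) := by
  induction rs generalizing v with
  | nil => exact h
  | cons r rs ih =>
    rw [List.foldl_cons]
    refine ih _ ?_
    rcases pySetD_cases v r with h' | ⟨t, _, h'⟩
    · rw [h']; exact h
    · rw [h']; exact e01_set h t

theorem pySetD_inRange (v : List Int) (i : Int) (h : PySem.Raise.InRange v.length i) :
    PySem.List.pySetD v i 1 = v.set (if 0 ≤ i then i.toNat else v.length - (-i).toNat) 1 := by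
  unfold PySem.Raise.InRange at h
  unfold PySem.List.pySetD PySem.List.pySet? PySem.List.pyIdx?
  split_ifs with h1 h2 h3 <;> simp_all

theorem mark_foldl_marked (rs : List Int) : ∀ (v : List Int),
    ∀ i ∈ rs, PySem.Raise.InRange v.length i →
      (rs.foldl (fun vv i => PySem.List.pySetD vv i 1) v).getD
        (if 0 ≤ i then i.toNat else v.length - (-i).toNat) 1 = 1 := by
  induction rs with
  | nil => intro v i hi; simp at hi
  | cons r rs ih =>
    intro v i hi hir
    rw [List.foldl_cons]
    rcases List.mem_cons.mp hi with hi | hi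
    · subst hi
      have hpos : (if 0 ≤ i then i.toNat else v.length - (-i).toNat) < v.length := by
        unfold PySem.Raise.InRange at hir
        split_ifs <;> omega
      rw [pySetD_inRange v i hir]
      have h1 : (v.set (if 0 ≤ i then i.toNat else v.length - (-i).toNat) 1).getD
          (if 0 ≤ i then i.toNat else v.length - (-i).toNat) 1 = 1 := getD_set_self hpos
      have := (mark_foldl_ext rs (v.set (if 0 ≤ i then i.toNat else v.length - (-i).toNat) 1)).2
        _ h1
      simpa using this
    · have hlen : (PySem.List.pySetD v r 1).length = v.length := PySem.List.length_pySetD ..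
      have := ih (PySem.List.pySetD v r 1) i hi (by rwa [hlen])
      rwa [hlen] at this

theorem map_const_zero (g : List (List Int)) :
    g.map (fun _ => (0 : Int)) = List.replicate g.length 0 := by
  induction g with
  | nil => rfl
  | cons x xs ih => simp [ih, List.replicate_succ]

-- ===== VERDICT (by name: the statement is the Claim_ definition above) =====
theorem calc_objective_spec : Claim_equal_calc_objective := by
  intro graph removed _hdom hpre
  unfold Spec_calc_objective
  set V := removed.foldl (fun vv i => PySem.List.pySetD vv i 1)
    (List.replicate graph.length (0 : Int)) with hV
  have hVlen : V.length = graph.length := by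
    rw [hV, mark_foldl_length]; simp
  have h01V : E01 V := by
    refine mark_foldl_e01 removed _ ?_
    intro x hx
    exact Or.inl (List.eq_of_mem_replicate hx)
  have hsafe : SafeV graph V := by
    intro a b h0 hE
    have ha : a < graph.length := by
      have := getD_lt_length h0; omega
    have hnohit : ∀ i ∈ removed, i ≠ (a : Int) ∧ i ≠ (a : Int) - (graph.length : Int) := by
      intro i hi
      have hir : PySem.Raise.InRange graph.length i := hpre.1 i hi
      have hir' : PySem.Raise.InRange (List.replicate graph.length (0 : Int)).length i := by
        simpa using hir
      have hmark := mark_foldl_marked removed (List.replicate graph.length (0 : Int)) i hi hir'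
      rw [← hV] at hmark
      simp only [List.length_replicate] at hmark
      unfold PySem.Raise.InRange at hir
      constructor
      · intro heq
        subst heq
        rw [if_pos (by omega)] at hmark
        rw [show ((a : Int)).toNat = a from by omega] at hmark
        rw [h0] at hmark
        norm_num at hmark
      · intro heq
        subst heq
        rw [if_neg (by omega)] at hmark
        rw [show graph.length - (-((a : Int) - (graph.length : Int))).toNat = a from by omega]
          at hmark
        rw [h0] at hmark
        norm_num at hmark
    have hrow := hpre.2 a ha hnohit
    have hb : b < (graph.getD a []).length := getD0_lt hE
    have := hrow b hb hE
    omega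
  have hA : calc_objective graph removed = calc_loop (graph.length + 1) graph V 0 := by
    unfold calc_objective
    rw [map_const_zero]
  have hB : calc_objective_alt graph removed =
      ((List.range' 0 graph.length).foldl
        (fun (p : Int × List Int) s =>
          if p.2.getD s 1 = 0 then
            (p.1 + 1, cnp_stack_loop (graph.length + 1) graph [s] (p.2.set s 1))
          else p)
        (0, V)).1 := by
    unfold calc_objective_alt
    simp only [List.range_eq_range']
    rw [← hV]
  rw [hA, hB]
  exact outer_eq graph graph.length 0 V 0 (graph.length + 1) (by omega) hVlen h01V hsafe
    (by intro t ht; omega)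
    (by
      have : V.count 0 ≤ V.length := List.count_le_length ..
      omega)
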